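-- pv_equiv track=rewrite | github.com/yongmin01/Algorithm | Programmers/지게차와 크레인.py | solution
-- ===== SOURCE A (Python) =====
-- from collections import deque
--
-- def solution(storage, requests):
--     storage = [list(map(str, storage[i])) for i in range(len(storage))]
--
--     def bfs(x, y, rows, columns) : # 현재 컨테이너가 접근 가능한 컨테이너인지 바깥으로 뻗어나가며 확인
--         visited = [[False for _ in range(columns)] for _ in range(rows)]
--         visited[x][y] = True
--
--         q = deque()
--         q.append([x, y])
--         dx, dy = [-1, 0, 1, 0], [0, 1, 0, -1]
--         while q :
--             x, y = q.popleft()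
--             for i in range(4) :
--                 nx, ny = x+dx[i], y+dy[i]
--                 if 0 <= nx < rows and 0 <= ny < columns :
--                     if storage[nx][ny] == 0 and not visited[nx][ny] :
--                         q.append([nx, ny])
--                         visited[nx][ny] = True
--                 else :
--                     return True
--         return False
--
--     answer = 0
--     rows, columns = len(storage), len(storage[0])
--     for request in requests :
--         if len(request) == 1 : # 지게차 이용
--             order = request[0]
--             temp = []
--             for r in range(rows) :
--                 for c in range(columns) :
--                     if storage[r][c] == order :
--                         if bfs(r, c, rows, columns) :
--                             temp.append([r, c])
--             for x, y in temp : # 꺼냄 처리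
--                 storage[x][y] = 0
--                 answer += 1
--
--         else : # 크레인 사용
--             order = request[0]
--             for r in range(rows) :
--                 for c in range(columns) :
--                     if storage[r][c] == order : # 요청과 일치하는 컨테이너 즉시 꺼냄 처리(0)
--                         storage[r][c] = 0
--                         answer += 1
--
--
--     return rows*columns - answer
-- ===== SOURCE B (Python) =====
-- def solution(storage, requests):
--     rows, cols = len(storage), len(storage[0])
--     # board as a dict of remaining containers; an absent key is an empty cell
--     box = {(r, c): ch
--            for r, row in enumerate(storage)
--            for c, ch in enumerate(row[:cols])}
--
--     def on_border(p):
--         r, c = p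
--         return r == 0 or r == rows - 1 or c == 0 or c == cols - 1
--
--     def neighbors(p):
--         r, c = p
--         return ((r - 1, c), (r + 1, c), (r, c - 1), (r, c + 1))
--
--     cells = [(r, c) for r in range(rows) for c in range(cols)]
--     removed = 0
--     for req in requests:
--         order = req[0]
--         if len(req) == 1:
--             # forklift: grow the set of outside-reachable empty cells to a fixpoint
--             reach = set()
--             while True:
--                 new = [p for p in cells
--                        if p not in box and p not in reach
--                        and (on_border(p) or any(n in reach for n in neighbors(p)))]
--                 if not new:
--                     break
--                 reach.update(new)
--             take = [p for p in cells
--                     if box.get(p) == order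
--                     and (on_border(p) or any(n in reach for n in neighbors(p)))]
--         else:
--             # crane: every matching container goes
--             take = [p for p in cells if box.get(p) == order]
--         for p in take:
--             del box[p]
--         removed += len(take)
--     return rows * cols - removed
-- ===== Notes on version B (the rewrite author's own statement) =====
-- stated objective: alternative
-- what changed: B replaces A's mutable char-grid with a dict of remaining containers and replaces A's per-matching-cell queue-BFS by a whole-board fixpoint iteration (repeated scans growing the set of outside-reachable empty cells until no change), then decides every matching cell against that one set; the crane branch becomes collect-then-delete instead of in-place mutation during the scan.
import Mathlib
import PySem

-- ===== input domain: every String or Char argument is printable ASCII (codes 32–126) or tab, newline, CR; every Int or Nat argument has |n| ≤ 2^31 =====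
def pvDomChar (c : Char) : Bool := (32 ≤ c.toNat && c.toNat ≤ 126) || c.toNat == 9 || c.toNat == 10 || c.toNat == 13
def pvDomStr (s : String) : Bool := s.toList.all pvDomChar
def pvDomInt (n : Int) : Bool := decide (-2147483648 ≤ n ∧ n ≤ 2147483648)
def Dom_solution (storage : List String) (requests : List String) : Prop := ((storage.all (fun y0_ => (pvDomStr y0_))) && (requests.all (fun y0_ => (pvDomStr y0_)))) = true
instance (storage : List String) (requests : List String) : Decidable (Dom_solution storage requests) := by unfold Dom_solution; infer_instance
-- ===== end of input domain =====

-- B trades A's mutable char-grid + per-matching-cell BFS for a dict of remaining containers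
-- and ONE whole-board fixpoint iteration per forklift request (objective: alternative).

-- ===== PORT A =====
-- A's board: list of rows of cells (`some ch` = container, `none` = Python's 0).
abbrev PvGrid := List (List (Option Char))

def gget (g : PvGrid) (r c : Nat) : Option Char := (g.getD r []).getD c none

def gset (g : PvGrid) (r c : Nat) : PvGrid := g.set r ((g.getD r []).set c none)

def vget (v : List (List Bool)) (r c : Nat) : Bool := (v.getD r []).getD c false

def vset (v : List (List Bool)) (r c : Nat) : List (List Bool) := v.set r ((v.getD r []).set c true)

-- dx/dy direction table of A's bfs
def dirsA : List (Int × Int) := [(-1, 0), (0, 1), (1, 0), (0, -1)]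

-- the `for i in range(4)` body of A's bfs; `none` encodes Python's `return True`
def stepDirsA (g : PvGrid) (rows cols x y : Nat) :
    List (Int × Int) → List (Nat × Nat) → List (List Bool) →
      Option (List (Nat × Nat) × List (List Bool))
  | [], q, vis => some (q, vis)
  | (dx, dy) :: ds, q, vis =>
    let nx : Int := (x : Int) + dx
    let ny : Int := (y : Int) + dy
    if 0 ≤ nx ∧ nx < (rows : Int) ∧ 0 ≤ ny ∧ ny < (cols : Int) then
      if gget g nx.toNat ny.toNat = none ∧ vget vis nx.toNat ny.toNat = false then
        stepDirsA g rows cols x y ds (q ++ [(nx.toNat, ny.toNat)]) (vset vis nx.toNat ny.toNat)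
      else
        stepDirsA g rows cols x y ds q vis
    else
      none

-- A's `while q` loop; fuel bounds the number of dequeues (each dequeue either came from the
-- single initial element or from an enqueue that freshly marked a visited cell, so
-- rows*cols+1 dequeues always suffice; proved in the lemmas below)
def bfsLoopA (g : PvGrid) (rows cols : Nat) :
    Nat → List (Nat × Nat) → List (List Bool) → Bool
  | 0, _, _ => false
  | _ + 1, [], _ => false
  | fuel + 1, (x, y) :: q, vis =>
    match stepDirsA g rows cols x y dirsA q vis with
    | none => true
    | some (q', vis') => bfsLoopA g rows cols fuel q' vis'

def bfsA (g : PvGrid) (x y rows cols : Nat) : Bool :=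
  bfsLoopA g rows cols (rows * cols + 1) [(x, y)]
    (vset (List.replicate rows (List.replicate cols false)) x y)

-- A's forklift scan building `temp`
def scanA (g : PvGrid) (rows cols : Nat) (order : Char) : List (Nat × Nat) :=
  (List.range rows).foldl (fun temp r =>
    (List.range cols).foldl (fun temp c =>
      if gget g r c = some order then
        if bfsA g r c rows cols then temp ++ [(r, c)] else temp
      else temp) temp) []

-- A's crane branch: in-place removal during the row-major scan
def craneScan (rows cols : Nat) (order : Char) (st : PvGrid × Int) : PvGrid × Int :=
  (List.range rows).foldl (fun st2 r =>
    (List.range cols).foldl (fun st3 c =>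
      if gget st3.1 r c = some order then (gset st3.1 r c, st3.2 + 1) else st3) st2) st

-- one request of A's main loop
def stepReqA (rows cols : Nat) (st : PvGrid × Int) (req : String) : PvGrid × Int :=
  match req.toList with
  | [] => st  -- Python raises IndexError at request[0]; excluded by Pre_solution
  | order :: rest =>
    if rest = [] then
      (scanA st.1 rows cols order).foldl
        (fun st2 rc => (gset st2.1 rc.1 rc.2, st2.2 + 1)) st
    else
      craneScan rows cols order st

def solution (storage : List String) (requests : List String) : Int :=
  let g0 : PvGrid := storage.map (fun s => s.toList.map some)
  let rows := g0.length
  let cols := (g0.getD 0 []).length  -- Python storage[0] raises on []; excluded by Pre_solution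
  (rows * cols : Int) - (requests.foldl (stepReqA rows cols) (g0, 0)).2

-- ===== PORT B =====
-- B's board: a dict from (row, col) to the container character; an absent key is an empty cell
def boxInit (storage : List String) (cols : Nat) : PySem.Dict (Int × Int) Char :=
  (PySem.List.enumerate storage).foldl (fun d rp =>
    (PySem.List.enumerate (PySem.List.slice rp.2.toList none (some (cols : Int)))).foldl
      (fun d cp => d.insert (rp.1, cp.1) cp.2) d) PySem.Dict.empty

def onBorderB (rows cols : Nat) (p : Int × Int) : Bool :=
  p.1 == 0 || p.1 == (rows : Int) - 1 || p.2 == 0 || p.2 == (cols : Int) - 1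

def nbrsB (p : Int × Int) : List (Int × Int) :=
  [(p.1 - 1, p.2), (p.1 + 1, p.2), (p.1, p.2 - 1), (p.1, p.2 + 1)]

-- `cells = [(r, c) for r in range(rows) for c in range(cols)]`
def cellsB (rows cols : Nat) : List (Int × Int) :=
  (PySem.List.pyRange 0 (rows : Int)).flatMap (fun r =>
    (PySem.List.pyRange 0 (cols : Int)).map (fun c => (r, c)))

-- one pass of B's fixpoint: the cells the pass would add to `reach`
def newCellsB (box : PySem.Dict (Int × Int) Char) (reach : PySem.Set (Int × Int))
    (rows cols : Nat) : List (Int × Int) :=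
  (cellsB rows cols).filter (fun p =>
    !(box.contains p) && !(PySem.Set.contains reach p) &&
      (onBorderB rows cols p || (nbrsB p).any (fun n => PySem.Set.contains reach n)))

-- B's `while True` loop; fuel bounds the passes (every pass before the fixpoint adds at
-- least one of the rows*cols cells to `reach`, so rows*cols+1 passes always suffice)
def reachGrow (box : PySem.Dict (Int × Int) Char) (rows cols : Nat) :
    Nat → PySem.Set (Int × Int) → PySem.Set (Int × Int)
  | 0, reach => reach
  | fuel + 1, reach =>
    let new := newCellsB box reach rows cols
    if new = [] then reach else reachGrow box rows cols fuel (PySem.Set.update reach new)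

def takeForkB (box : PySem.Dict (Int × Int) Char) (rows cols : Nat) (order : Char) :
    List (Int × Int) :=
  let reach := reachGrow box rows cols (rows * cols + 1) PySem.Set.empty
  (cellsB rows cols).filter (fun p =>
    box.get? p == some order &&
      (onBorderB rows cols p || (nbrsB p).any (fun n => PySem.Set.contains reach n)))

def takeCraneB (box : PySem.Dict (Int × Int) Char) (rows cols : Nat) (order : Char) :
    List (Int × Int) :=
  (cellsB rows cols).filter (fun p => box.get? p == some order)

-- one request of B's main loop: collect `take`, then delete its cells and count them
def stepReqB (rows cols : Nat) (st : PySem.Dict (Int × Int) Char × Int) (req : String) :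
    PySem.Dict (Int × Int) Char × Int :=
  match req.toList with
  | [] => st  -- Python raises IndexError at req[0]; excluded by Pre_solution
  | order :: rest =>
    let take := if rest = [] then takeForkB st.1 rows cols order
                else takeCraneB st.1 rows cols order
    (take.foldl (fun d p => d.erase p) st.1, st.2 + take.length)

def solution_alt (storage : List String) (requests : List String) : Int :=
  let rows := storage.length
  let cols := (storage.getD 0 "").toList.length
  let box := boxInit storage cols
  (rows * cols : Int) - (requests.foldl (stepReqB rows cols) (box, 0)).2

-- ===== PRECONDITION & SPEC =====
-- Pre_ = exactly the inputs where Python A returns: it raises IndexError on empty storage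
-- (storage[0]), on an empty request string (request[0]), and — when some request is processed —
-- on a row shorter than the first row (storage[r][c] with c < len(storage[0])).
def Pre_solution (storage : List String) (requests : List String) : Prop :=
  storage ≠ [] ∧ (∀ req ∈ requests, req ≠ "") ∧
    (requests = [] ∨ ∀ row ∈ storage, (storage.getD 0 "").toList.length ≤ row.toList.length)

instance (storage : List String) (requests : List String) : Decidable (Pre_solution storage requests) := by
  unfold Pre_solution; infer_instance

def pvWitness_solution : List String × List String := (["ab", "ba"], ["a"])

def Spec_solution (storage : List String) (requests : List String) (out : Int) : Prop := out = solution_alt storage requests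
instance (storage : List String) (requests : List String) (out : Int) : Decidable (Spec_solution storage requests out) := by unfold Spec_solution; infer_instance

-- ===== CLAIM (what is proved, stated in full; the proofs are below) =====
def Claim_equal_solution : Prop := ∀ (storage : List String) (requests : List String), Dom_solution storage requests → Pre_solution storage requests → Spec_solution storage requests (solution storage requests)

-- ===== LEMMAS AND PROOFS =====

-- ---- index-space vocabulary (proof-only) ----
def InR (rows cols : Nat) (p : Nat × Nat) : Prop := p.1 < rows ∧ p.2 < cols
def Emp (g : PvGrid) (p : Nat × Nat) : Prop := gget g p.1 p.2 = none
def Adj (p q : Nat × Nat) : Prop :=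
  (p.1 = q.1 ∧ (p.2 + 1 = q.2 ∨ q.2 + 1 = p.2)) ∨
  (p.2 = q.2 ∧ (p.1 + 1 = q.1 ∨ q.1 + 1 = p.1))
def Border (rows cols : Nat) (p : Nat × Nat) : Prop :=
  p.1 = 0 ∨ p.1 = rows - 1 ∨ p.2 = 0 ∨ p.2 = cols - 1
def InRZ (rows cols : Nat) (t : Int × Int) : Prop :=
  0 ≤ t.1 ∧ t.1 < (rows : Int) ∧ 0 ≤ t.2 ∧ t.2 < (cols : Int)
def toN (t : Int × Int) : Nat × Nat := (t.1.toNat, t.2.toNat)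
def tgt (x y : Nat) (d : Int × Int) : Int × Int := ((x : Int) + d.1, (y : Int) + d.2)

-- paths through empty in-range cells
inductive ReachE (g : PvGrid) (rows cols : Nat) : (Nat × Nat) → (Nat × Nat) → Prop
  | refl (p) : InR rows cols p → Emp g p → ReachE g rows cols p p
  | cons (p q r) : InR rows cols p → Emp g p → Adj p q → ReachE g rows cols q r →
      ReachE g rows cols p r

-- "reachable from the border" (B's fixpoint computes these)
def RFB (g : PvGrid) (rows cols : Nat) (p : Nat × Nat) : Prop :=
  ∃ b, Border rows cols b ∧ ReachE g rows cols b p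
-- "the container at s can be taken out" (what A's bfs decides)
def RTB (g : PvGrid) (rows cols : Nat) (s : Nat × Nat) : Prop :=
  Border rows cols s ∨ ∃ u, Adj s u ∧ InR rows cols u ∧ Emp g u ∧
    ∃ b, ReachE g rows cols u b ∧ Border rows cols b

def VIn (v : List (List Bool)) (p : Nat × Nat) : Prop := vget v p.1 p.2 = true
def Shape (rows cols : Nat) (v : List (List Bool)) : Prop :=
  v.length = rows ∧ ∀ row ∈ v, row.length = cols
def cnt (v : List (List Bool)) : Nat := (v.map (fun row => row.count true)).sum

lemma pv_getD_set_eq {α : Type} (l : List α) (i : Nat) (a d : α) (h : i < l.length) :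
    (l.set i a).getD i d = a := by
  simp [List.getD_eq_getElem?_getD, List.getElem?_set_self h]

lemma pv_getD_set_ne {α : Type} (l : List α) (i j : Nat) (a d : α) (h : j ≠ i) :
    (l.set i a).getD j d = l.getD j d := by
  simp [List.getD_eq_getElem?_getD, List.getElem?_set_ne (fun hh => h hh.symm)]

lemma pv_getD_mem {α : Type} (l : List α) (i : Nat) (d : α) (h : i < l.length) :
    l.getD i d ∈ l := by
  rw [List.getD_eq_getElem?_getD, List.getElem?_eq_getElem h]
  exact List.getElem_mem h

lemma pv_getD_oob {α : Type} (l : List α) (i : Nat) (d : α) (h : l.length ≤ i) :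
    l.getD i d = d := by
  rw [List.getD_eq_getElem?_getD, List.getElem?_eq_none h]
  rfl

lemma pv_set_oob {α : Type} (l : List α) (i : Nat) (a : α) (h : l.length ≤ i) :
    l.set i a = l := by
  apply List.ext_getElem (by simp)
  intro n h1 h2
  rw [List.getElem_set]
  split
  · omega
  · rfl

lemma vget_vset_self (v : List (List Bool)) (x y rows cols : Nat)
    (hs : Shape rows cols v) (hx : x < rows) (hy : y < cols) :
    vget (vset v x y) x y = true := by
  obtain ⟨hl, hrow⟩ := hs
  have hx' : x < v.length := by omega
  have hyr : y < (v.getD x []).length := by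
    rw [hrow _ (pv_getD_mem _ _ _ hx')]; exact hy
  unfold vget vset
  rw [pv_getD_set_eq _ _ _ _ hx', pv_getD_set_eq _ _ _ _ hyr]

lemma vget_vset_ne (v : List (List Bool)) (x y a b : Nat) (h : (a, b) ≠ (x, y)) :
    vget (vset v x y) a b = vget v a b := by
  unfold vget vset
  by_cases hax : a = x
  · subst hax
    have hby : b ≠ y := fun hb => h (by rw [hb])
    by_cases hx : a < v.length
    · rw [pv_getD_set_eq _ _ _ _ hx, pv_getD_set_ne _ _ _ _ _ hby]
    · rw [pv_set_oob _ _ _ (by omega)]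
  · rw [pv_getD_set_ne _ _ _ _ _ hax]

lemma shape_vset (v : List (List Bool)) (x y rows cols : Nat) (hs : Shape rows cols v) :
    Shape rows cols (vset v x y) := by
  obtain ⟨hl, hrow⟩ := hs
  by_cases hx : x < v.length
  · refine ⟨by simpa [vset] using hl, ?_⟩
    intro row hm
    rcases List.mem_or_eq_of_mem_set hm with h | h
    · exact hrow _ h
    · subst h
      rw [List.length_set]
      exact hrow _ (pv_getD_mem _ _ _ hx)
  · unfold vset
    rw [pv_set_oob _ _ _ (by omega)]
    exact ⟨hl, hrow⟩

lemma pv_count_set_true (row : List Bool) :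
    ∀ y : Nat, y < row.length → row.getD y false = false →
      (row.set y true).count true = row.count true + 1 := by
  induction row with
  | nil => intro y h; simp at h
  | cons b bt ihb =>
    intro y hyr hfy
    cases y with
    | zero => simp at hfy; simp [hfy]
    | succ y' =>
      simp only [List.set_cons_succ, List.count_cons]
      rw [ihb y' (by simpa using hyr) (by simpa using hfy)]
      omega

lemma cnt_vset (v : List (List Bool)) (x y rows cols : Nat)
    (hs : Shape rows cols v) (hx : x < rows) (hy : y < cols)
    (hf : vget v x y = false) : cnt (vset v x y) = cnt v + 1 := by
  obtain ⟨hl, hrow⟩ := hs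
  subst hl
  induction v generalizing x with
  | nil => simp at hx
  | cons row t ih =>
    cases x with
    | zero =>
      have hyr : y < row.length := by rw [hrow _ List.mem_cons_self]; exact hy
      have hfy : row.getD y false = false := by simpa [vget] using hf
      unfold vset cnt
      simp only [List.getD_cons_zero, List.set_cons_zero, List.map_cons, List.sum_cons]
      rw [pv_count_set_true row y hyr hfy]; omega
    | succ x' =>
      have hx' : x' < t.length := by simpa using hx
      have hv : vget t x' y = false := by simpa [vget] using hf
      have := ih x' hv (fun row hm => hrow _ (List.mem_cons_of_mem _ hm)) hx'
      unfold vset cnt at *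
      simp only [List.getD_cons_succ, List.set_cons_succ, List.map_cons, List.sum_cons]
      omega

lemma cnt_le (v : List (List Bool)) (rows cols : Nat) (hs : Shape rows cols v) :
    cnt v ≤ rows * cols := by
  obtain ⟨hl, hrow⟩ := hs
  subst hl
  induction v with
  | nil => simp [cnt]
  | cons row t ih =>
    have h1 : row.count true ≤ cols := by
      rw [← hrow _ List.mem_cons_self]; exact List.count_le_length
    have h2 := ih (fun r hm => hrow _ (List.mem_cons_of_mem _ hm))
    unfold cnt at *
    simp only [List.map_cons, List.sum_cons, List.length_cons]
    calc row.count true + (t.map (fun r => r.count true)).sum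
        ≤ cols + t.length * cols := by omega
      _ ≤ (t.length + 1) * cols := by ring_nf; omega

lemma vget_blank (rows cols r c : Nat) :
    vget (List.replicate rows (List.replicate cols false)) r c = false := by
  unfold vget
  have hrow : ∀ l : List Bool, l = List.replicate cols false ∨ l = [] → l.getD c false = false := by
    rintro l (rfl | rfl)
    · rcases Nat.lt_or_ge c cols with h | h
      · simp [List.getD_eq_getElem?_getD, h]
      · rw [pv_getD_oob _ _ _ (by simpa using h)]
    · simp
  apply hrow
  rcases Nat.lt_or_ge r rows with h | h
  · left; simp [List.getD_eq_getElem?_getD, h]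
  · right; rw [pv_getD_oob _ _ _ (by simpa using h)]

lemma shape_blank (rows cols : Nat) :
    Shape rows cols (List.replicate rows (List.replicate cols false)) := by
  refine ⟨by simp, ?_⟩
  intro row hm
  rw [List.eq_of_mem_replicate hm]; simp

-- ---- reachability facts ----
lemma Adj_symm {p q : Nat × Nat} (h : Adj p q) : Adj q p := by
  unfold Adj at *
  omega

lemma ReachE_head {g rows cols p r} (h : ReachE g rows cols p r) : InR rows cols p ∧ Emp g p := by
  cases h with
  | refl _ hi he => exact ⟨hi, he⟩
  | cons _ _ _ hi he _ _ => exact ⟨hi, he⟩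

lemma ReachE_snoc {g rows cols p q s} (h : ReachE g rows cols p q) (ha : Adj q s)
    (hi : InR rows cols s) (he : Emp g s) : ReachE g rows cols p s := by
  induction h with
  | refl p hip hep => exact ReachE.cons p s s hip hep ha (ReachE.refl s hi he)
  | cons p q r hip hep hadj _ ih => exact ReachE.cons p q s hip hep hadj (ih ha)

lemma ReachE_symm {g rows cols p r} (h : ReachE g rows cols p r) : ReachE g rows cols r p := by
  induction h with
  | refl p hip hep => exact ReachE.refl p hip hep
  | cons p q r hip hep hadj _ ih => exact ReachE_snoc ih (Adj_symm hadj) hip hep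

lemma ReachE_closed {g rows cols} (P : Nat × Nat → Prop)
    (hcl : ∀ p, P p → ∀ u, Adj p u → InR rows cols u → Emp g u → P u)
    {u v} (h : ReachE g rows cols u v) (hu : P u) : P v := by
  induction h with
  | refl => exact hu
  | cons p q r hip hep hadj hq ih =>
    obtain ⟨hiq, heq⟩ := ReachE_head hq
    exact ih (hcl p hu q hadj hiq heq)

-- ---- direction tables vs Adj/Border ----
lemma dirsA_oob_iff (rows cols x y : Nat) (hx : x < rows) (hy : y < cols) :
    (∃ d ∈ dirsA, ¬ InRZ rows cols (tgt x y d)) ↔ Border rows cols (x, y) := by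
  simp only [dirsA, List.mem_cons, List.not_mem_nil, or_false, InRZ, tgt, Border]
  constructor
  · rintro ⟨d, (rfl | rfl | rfl | rfl), hd⟩ <;> simp only at hd <;> omega
  · intro h
    rcases (by omega :
        (x : Int) - 1 < 0 ∨ (rows : Int) ≤ (x : Int) + 1 ∨ (y : Int) - 1 < 0 ∨ (cols : Int) ≤ (y : Int) + 1) with
      h1 | h1 | h1 | h1
    · exact ⟨(-1, 0), by simp, by simp; omega⟩
    · exact ⟨(1, 0), by simp, by simp; omega⟩
    · exact ⟨(0, -1), by simp, by simp; omega⟩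
    · exact ⟨(0, 1), by simp, by simp; omega⟩

lemma dirsA_adj (rows cols x y : Nat) {d : Int × Int} (hd : d ∈ dirsA)
    (hin : InRZ rows cols (tgt x y d)) :
    Adj (x, y) (toN (tgt x y d)) ∧ InR rows cols (toN (tgt x y d)) := by
  simp only [dirsA, List.mem_cons, List.not_mem_nil, or_false] at hd
  obtain ⟨h1, h2, h3, h4⟩ := hin
  rcases hd with rfl | rfl | rfl | rfl <;>
    simp only [tgt, toN, Adj, InR] at * <;> constructor <;> omega

lemma adj_dirsA (rows cols x y : Nat) {p : Nat × Nat} (ha : Adj (x, y) p)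
    (hp : InR rows cols p) :
    ∃ d ∈ dirsA, toN (tgt x y d) = p ∧ InRZ rows cols (tgt x y d) := by
  obtain ⟨p1, p2⟩ := p
  obtain ⟨hp1, hp2⟩ := hp
  simp only [Adj] at ha
  rcases ha with ⟨he, h1 | h1⟩ | ⟨he, h1 | h1⟩
  · exact ⟨(0, 1), by simp [dirsA], by simp only [toN, tgt, InRZ, Prod.mk.injEq]; omega⟩
  · exact ⟨(0, -1), by simp [dirsA], by simp only [toN, tgt, InRZ, Prod.mk.injEq]; omega⟩
  · exact ⟨(1, 0), by simp [dirsA], by simp only [toN, tgt, InRZ, Prod.mk.injEq]; omega⟩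
  · exact ⟨(-1, 0), by simp [dirsA], by simp only [toN, tgt, InRZ, Prod.mk.injEq]; omega⟩

-- ---- A's bfs is correct ----
def ReachS (g : PvGrid) (rows cols : Nat) (s p : Nat × Nat) : Prop :=
  p = s ∨ ∃ u, Adj s u ∧ ReachE g rows cols u p

def DoneA (g : PvGrid) (rows cols : Nat) (v : List (List Bool)) (p : Nat × Nat) : Prop :=
  ¬ Border rows cols p ∧ ∀ u, Adj p u → InR rows cols u → Emp g u → VIn v u

def InvA (g : PvGrid) (rows cols : Nat) (s : Nat × Nat)
    (q : List (Nat × Nat)) (v : List (List Bool)) : Prop :=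
  Shape rows cols v ∧ VIn v s ∧ (∀ p ∈ q, InR rows cols p ∧ VIn v p) ∧
  (∀ p, VIn v p → ReachS g rows cols s p ∧ (p = s ∨ Emp g p)) ∧
  (∀ p, VIn v p → p ∈ q ∨ DoneA g rows cols v p)

lemma pv_InRZ_toN {rows cols : Nat} {t : Int × Int} (h : InRZ rows cols t) :
    InR rows cols (toN t) := by
  obtain ⟨h1, h2, h3, h4⟩ := h
  simp only [InR, toN]
  omega

lemma pv_VIn_vset {v : List (List Bool)} {rows cols : Nat} {p0 : Nat × Nat}
    (hs : Shape rows cols v) (hin : InR rows cols p0) (p : Nat × Nat) :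
    VIn (vset v p0.1 p0.2) p ↔ VIn v p ∨ p = p0 := by
  constructor
  · intro h
    by_cases hp : p = p0
    · exact Or.inr hp
    · left
      unfold VIn at *
      rwa [vget_vset_ne _ _ _ _ _ (fun hh => hp (by
        obtain ⟨a, b⟩ := p; obtain ⟨a0, b0⟩ := p0
        simpa using hh))] at h
  · rintro (h | rfl)
    · by_cases hp : p = p0
      · subst hp
        exact vget_vset_self _ _ _ _ _ hs hin.1 hin.2
      · unfold VIn at *
        rwa [vget_vset_ne _ _ _ _ _ (fun hh => hp (by
          obtain ⟨a, b⟩ := p; obtain ⟨a0, b0⟩ := p0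
          simpa using hh))]
    · exact vget_vset_self _ _ _ _ _ hs hin.1 hin.2

lemma stepDirsA_some_spec (g : PvGrid) (rows cols x y : Nat) :
    ∀ (ds : List (Int × Int)) (q : List (Nat × Nat)) (vis : List (List Bool))
      (q' : List (Nat × Nat)) (vis' : List (List Bool)),
      Shape rows cols vis →
      stepDirsA g rows cols x y ds q vis = some (q', vis') →
      ∃ Δ, q' = q ++ Δ ∧
        (∀ p ∈ Δ, InR rows cols p ∧ Emp g p ∧ ∃ d ∈ ds, InRZ rows cols (tgt x y d) ∧ toN (tgt x y d) = p) ∧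
        (∀ p, VIn vis' p ↔ VIn vis p ∨ p ∈ Δ) ∧
        Shape rows cols vis' ∧
        (∀ d ∈ ds, InRZ rows cols (tgt x y d) → Emp g (toN (tgt x y d)) → VIn vis' (toN (tgt x y d))) ∧
        Δ.length + cnt vis = cnt vis' := by
  intro ds
  induction ds with
  | nil =>
    intro q vis q' vis' hs h
    simp only [stepDirsA, Option.some.injEq, Prod.mk.injEq] at h
    obtain ⟨rfl, rfl⟩ := h
    exact ⟨[], by simp, by simp, fun p => by simp, hs, by simp, by simp⟩
  | cons d ds ih =>
    intro q vis q' vis' hs h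
    obtain ⟨dx, dy⟩ := d
    simp only [stepDirsA] at h
    by_cases hin : 0 ≤ (x : Int) + dx ∧ (x : Int) + dx < (rows : Int) ∧ 0 ≤ (y : Int) + dy ∧ (y : Int) + dy < (cols : Int)
    · rw [if_pos hin] at h
      have hinz : InRZ rows cols (tgt x y (dx, dy)) := hin
      set p0 : Nat × Nat := (((x : Int) + dx).toNat, ((y : Int) + dy).toNat) with hp0
      have hp0t : toN (tgt x y (dx, dy)) = p0 := rfl
      have hinrp0 : InR rows cols p0 := hp0t ▸ pv_InRZ_toN hinz
      by_cases hm : gget g ((x : Int) + dx).toNat ((y : Int) + dy).toNat = none ∧ vget vis ((x : Int) + dx).toNat ((y : Int) + dy).toNat = false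
      · rw [if_pos hm] at h
        have hs' : Shape rows cols (vset vis p0.1 p0.2) := shape_vset _ _ _ _ _ hs
        obtain ⟨Δ, hq, hprops, hiff, hsh, hcl, hcnt⟩ := ih (q ++ [p0]) _ q' vis' hs' h
        have hvset : ∀ p, VIn (vset vis p0.1 p0.2) p ↔ VIn vis p ∨ p = p0 :=
          pv_VIn_vset hs hinrp0
        refine ⟨p0 :: Δ, by simpa [List.append_assoc] using hq, ?_, ?_, hsh, ?_, ?_⟩
        · intro p hp
          rcases List.mem_cons.mp hp with rfl | hp
          · exact ⟨hinrp0, hm.1, (dx, dy), List.mem_cons_self, hinz, rfl⟩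
          · obtain ⟨h1, h2, d', hd', h3, h4⟩ := hprops p hp
            exact ⟨h1, h2, d', List.mem_cons_of_mem _ hd', h3, h4⟩
        · intro p
          rw [hiff p, hvset p]
          simp only [List.mem_cons]
          tauto
        · intro d' hd' hz he
          rcases List.mem_cons.mp hd' with heq | hd'
          · rw [heq, hp0t]
            rw [hiff, hvset]
            simp
          · exact hcl d' hd' hz he
        · have := cnt_vset vis p0.1 p0.2 rows cols hs hinrp0.1 hinrp0.2 hm.2
          simp only [List.length_cons]
          omega
      · rw [if_neg hm] at h
        obtain ⟨Δ, hq, hprops, hiff, hsh, hcl, hcnt⟩ := ih q vis q' vis' hs h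
        refine ⟨Δ, hq, ?_, hiff, hsh, ?_, hcnt⟩
        · intro p hp
          obtain ⟨h1, h2, d', hd', h3, h4⟩ := hprops p hp
          exact ⟨h1, h2, d', List.mem_cons_of_mem _ hd', h3, h4⟩
        · intro d' hd' hz he
          rcases List.mem_cons.mp hd' with heq | hd'
          · subst heq
            have hmarked : vget vis ((x : Int) + dx).toNat ((y : Int) + dy).toNat = true := by
              rcases Bool.eq_false_or_eq_true (vget vis ((x : Int) + dx).toNat ((y : Int) + dy).toNat) with ht | hf
              · exact ht
              · exact absurd ⟨he, hf⟩ hm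
            exact (hiff _).mpr (Or.inl hmarked)
          · exact hcl d' hd' hz he
    · rw [if_neg hin] at h
      simp at h

lemma stepDirsA_none_iff (g : PvGrid) (rows cols x y : Nat) :
    ∀ (ds : List (Int × Int)) (q : List (Nat × Nat)) (vis : List (List Bool)),
      stepDirsA g rows cols x y ds q vis = none ↔
        ∃ d ∈ ds, ¬ InRZ rows cols (tgt x y d) := by
  intro ds
  induction ds with
  | nil => intro q vis; simp [stepDirsA]
  | cons d ds ih =>
    intro q vis
    obtain ⟨dx, dy⟩ := d
    simp only [stepDirsA]
    by_cases hin : 0 ≤ (x : Int) + dx ∧ (x : Int) + dx < (rows : Int) ∧ 0 ≤ (y : Int) + dy ∧ (y : Int) + dy < (cols : Int)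
    · rw [if_pos hin]
      have hinz : InRZ rows cols (tgt x y (dx, dy)) := hin
      have hrec : (if gget g ((x : Int) + dx).toNat ((y : Int) + dy).toNat = none ∧ vget vis ((x : Int) + dx).toNat ((y : Int) + dy).toNat = false then
          stepDirsA g rows cols x y ds (q ++ [(((x : Int) + dx).toNat, ((y : Int) + dy).toNat)]) (vset vis ((x : Int) + dx).toNat ((y : Int) + dy).toNat)
        else stepDirsA g rows cols x y ds q vis) = none ↔ ∃ d' ∈ ds, ¬ InRZ rows cols (tgt x y d') := by
        split
        · exact ih _ _
        · exact ih _ _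
      rw [hrec]
      constructor
      · rintro ⟨d', hd', hn⟩
        exact ⟨d', List.mem_cons_of_mem _ hd', hn⟩
      · rintro ⟨d', hd', hn⟩
        rcases List.mem_cons.mp hd' with rfl | hmem
        · exact absurd hinz hn
        · exact ⟨d', hmem, hn⟩
    · rw [if_neg hin]
      exact ⟨fun _ => ⟨(dx, dy), List.mem_cons_self, hin⟩, fun _ => rfl⟩

lemma ReachS_extend {g : PvGrid} {rows cols : Nat} {s x p : Nat × Nat}
    (hr : ReachS g rows cols s x) (hx : x = s ∨ Emp g x) (_hxin : InR rows cols x)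
    (ha : Adj x p) (hip : InR rows cols p) (hep : Emp g p) :
    ReachS g rows cols s p := by
  rcases hr with rfl | ⟨u, hau, hre⟩
  · exact Or.inr ⟨p, ha, ReachE.refl p hip hep⟩
  · rcases hx with rfl | hex
    · exact Or.inr ⟨p, ha, ReachE.refl p hip hep⟩
    · exact Or.inr ⟨u, hau, ReachE_snoc hre ha hip hep⟩

lemma stepA_preserves (g : PvGrid) (rows cols : Nat) (s : Nat × Nat)
    (x y : Nat) (t : List (Nat × Nat)) (vis : List (List Bool))
    (q' : List (Nat × Nat)) (vis' : List (List Bool))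
    (hInv : InvA g rows cols s ((x, y) :: t) vis)
    (hstep : stepDirsA g rows cols x y dirsA t vis = some (q', vis')) :
    InvA g rows cols s q' vis' ∧ q'.length + cnt vis = t.length + cnt vis' := by
  obtain ⟨hs, hvs, hq, hreach, hdone⟩ := hInv
  obtain ⟨hxyin, hxyv⟩ := hq _ List.mem_cons_self
  obtain ⟨Δ, hqeq, hprops, hiff, hsh, hcl, hcnt⟩ :=
    stepDirsA_some_spec g rows cols x y dirsA t vis q' vis' hs hstep
  have hnoOOB : ∀ d ∈ dirsA, InRZ rows cols (tgt x y d) := by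
    intro d hd
    by_contra hn
    have hnone := (stepDirsA_none_iff g rows cols x y dirsA t vis).mpr ⟨d, hd, hn⟩
    rw [hnone] at hstep
    simp at hstep
  have hnb : ¬ Border rows cols (x, y) := by
    intro hb
    obtain ⟨d, hd, hn⟩ := (dirsA_oob_iff rows cols x y hxyin.1 hxyin.2).mpr hb
    exact hn (hnoOOB d hd)
  have hclxy : ∀ u, Adj (x, y) u → InR rows cols u → Emp g u → VIn vis' u := by
    intro u ha hi he
    obtain ⟨d, hd, hteq, hz⟩ := adj_dirsA rows cols x y ha hi
    have := hcl d hd hz (by rw [hteq]; exact he)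
    rwa [hteq] at this
  have hmono : ∀ p, VIn vis p → VIn vis' p := fun p hp => (hiff p).mpr (Or.inl hp)
  have hΔfacts : ∀ p ∈ Δ, InR rows cols p ∧ Emp g p ∧ Adj (x, y) p := by
    intro p hp
    obtain ⟨h1, h2, d, hd, hz, hteq⟩ := hprops p hp
    refine ⟨h1, h2, ?_⟩
    have := (dirsA_adj rows cols x y hd hz).1
    rwa [hteq] at this
  have hreach' : ∀ p, VIn vis' p → ReachS g rows cols s p ∧ (p = s ∨ Emp g p) := by
    intro p hp
    rcases (hiff p).mp hp with hold | hnew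
    · exact hreach p hold
    · obtain ⟨h1, h2, h3⟩ := hΔfacts p hnew
      obtain ⟨hrs, hse⟩ := hreach _ hxyv
      exact ⟨ReachS_extend hrs hse hxyin h3 h1 h2, Or.inr h2⟩
  refine ⟨⟨hsh, hmono _ hvs, ?_, hreach', ?_⟩, ?_⟩
  · intro p hp
    rw [hqeq] at hp
    rcases List.mem_append.mp hp with hp | hp
    · obtain ⟨h1, h2⟩ := hq p (List.mem_cons_of_mem _ hp)
      exact ⟨h1, hmono _ h2⟩
    · obtain ⟨h1, h2, _⟩ := hΔfacts p hp
      exact ⟨h1, (hiff p).mpr (Or.inr hp)⟩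
  · intro p hp
    rcases (hiff p).mp hp with hold | hnew
    · rcases hdone p hold with hmem | hdn
      · rcases List.mem_cons.mp hmem with rfl | hmem
        · exact Or.inr ⟨hnb, hclxy⟩
        · exact Or.inl (hqeq ▸ List.mem_append.mpr (Or.inl hmem))
      · exact Or.inr ⟨hdn.1, fun u ha hi he => hmono _ (hdn.2 u ha hi he)⟩
    · exact Or.inl (hqeq ▸ List.mem_append.mpr (Or.inr hnew))
  · rw [hqeq]
    simp only [List.length_append]
    omega

lemma bfsLoopA_true (g : PvGrid) (rows cols : Nat) (s : Nat × Nat) :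
    ∀ (fuel : Nat) (q : List (Nat × Nat)) (vis : List (List Bool)),
      InvA g rows cols s q vis →
      bfsLoopA g rows cols fuel q vis = true → RTB g rows cols s := by
  intro fuel
  induction fuel with
  | zero => intro q vis _ h; simp [bfsLoopA] at h
  | succ fuel ih =>
    intro q vis hInv h
    match q with
    | [] => simp [bfsLoopA] at h
    | (x, y) :: t =>
      rcases hsd : stepDirsA g rows cols x y dirsA t vis with _ | ⟨q', vis'⟩
      · obtain ⟨hs, hvs, hq, hreach, hdone⟩ := hInv
        obtain ⟨hxyin, hxyv⟩ := hq _ List.mem_cons_self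
        obtain ⟨d, hd, hn⟩ := (stepDirsA_none_iff g rows cols x y dirsA t vis).mp hsd
        have hb : Border rows cols (x, y) :=
          (dirsA_oob_iff rows cols x y hxyin.1 hxyin.2).mp ⟨d, hd, hn⟩
        obtain ⟨hrs, _⟩ := hreach _ hxyv
        rcases hrs with heq | ⟨u, hau, hre⟩
        · exact Or.inl (heq ▸ hb)
        · obtain ⟨hiu, heu⟩ := ReachE_head hre
          exact Or.inr ⟨u, hau, hiu, heu, (x, y), hre, hb⟩
      · simp only [bfsLoopA, hsd] at h
        obtain ⟨hInv', _⟩ := stepA_preserves g rows cols s x y t vis q' vis' hInv hsd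
        exact ih q' vis' hInv' h

lemma bfsLoopA_false (g : PvGrid) (rows cols : Nat) (s : Nat × Nat) :
    ∀ (fuel : Nat) (q : List (Nat × Nat)) (vis : List (List Bool)),
      q.length + (rows * cols - cnt vis) ≤ fuel →
      InvA g rows cols s q vis →
      bfsLoopA g rows cols fuel q vis = false → ¬ RTB g rows cols s := by
  intro fuel
  induction fuel with
  | zero =>
    intro q vis hm hInv _
    match q with
    | [] =>
      obtain ⟨hs, hvs, hq, hreach, hdone⟩ := hInv
      have hD : ∀ p, VIn vis p → DoneA g rows cols vis p := by
        intro p hp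
        rcases hdone p hp with hmem | hdn
        · simp at hmem
        · exact hdn
      intro hrtb
      rcases hrtb with hb | ⟨u, hau, hiu, heu, b, hre, hb⟩
      · exact (hD s hvs).1 hb
      · have hvu : VIn vis u := (hD s hvs).2 u hau hiu heu
        have hvb : VIn vis b :=
          ReachE_closed (VIn vis) (fun p hp u' ha hi he => (hD p hp).2 u' ha hi he) hre hvu
        exact (hD b hvb).1 hb
    | p :: t => simp at hm
  | succ fuel ih =>
    intro q vis hm hInv h
    match q with
    | [] =>
      obtain ⟨hs, hvs, hq, hreach, hdone⟩ := hInv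
      have hD : ∀ p, VIn vis p → DoneA g rows cols vis p := by
        intro p hp
        rcases hdone p hp with hmem | hdn
        · simp at hmem
        · exact hdn
      intro hrtb
      rcases hrtb with hb | ⟨u, hau, hiu, heu, b, hre, hb⟩
      · exact (hD s hvs).1 hb
      · have hvu : VIn vis u := (hD s hvs).2 u hau hiu heu
        have hvb : VIn vis b :=
          ReachE_closed (VIn vis) (fun p hp u' ha hi he => (hD p hp).2 u' ha hi he) hre hvu
        exact (hD b hvb).1 hb
    | (x, y) :: t =>
      rcases hsd : stepDirsA g rows cols x y dirsA t vis with _ | ⟨q', vis'⟩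
      · simp [bfsLoopA, hsd] at h
      · simp only [bfsLoopA, hsd] at h
        obtain ⟨hInv', hcnt⟩ := stepA_preserves g rows cols s x y t vis q' vis' hInv hsd
        have hle : cnt vis' ≤ rows * cols := cnt_le _ _ _ hInv'.1
        have hle0 : cnt vis ≤ rows * cols := cnt_le _ _ _ hInv.1
        refine ih q' vis' ?_ hInv' h
        simp only [List.length_cons] at hm
        omega

lemma bfsA_correct (g : PvGrid) (rows cols : Nat) (s : Nat × Nat) (hs : InR rows cols s) :
    bfsA g s.1 s.2 rows cols = true ↔ RTB g rows cols s := by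
  obtain ⟨s1, s2⟩ := s
  set blank := List.replicate rows (List.replicate cols false) with hbl
  have hsb : Shape rows cols blank := shape_blank rows cols
  set vis0 := vset blank s1 s2 with hv0
  have hs0 : Shape rows cols vis0 := shape_vset _ _ _ _ _ hsb
  have hVIn0 : ∀ p, VIn vis0 p ↔ p = (s1, s2) := by
    intro p
    rw [hv0, show vset blank s1 s2 = vset blank ((s1, s2) : Nat × Nat).1 ((s1, s2) : Nat × Nat).2 from rfl,
      pv_VIn_vset hsb hs p]
    have : ¬ VIn blank p := by
      unfold VIn
      rw [hbl, vget_blank]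
      simp
    tauto
  have hInv : InvA g rows cols (s1, s2) [(s1, s2)] vis0 := by
    refine ⟨hs0, (hVIn0 _).mpr rfl, ?_, ?_, ?_⟩
    · intro p hp
      rw [List.mem_singleton.mp hp]
      exact ⟨hs, (hVIn0 _).mpr rfl⟩
    · intro p hp
      rw [hVIn0 p] at hp
      subst hp
      exact ⟨Or.inl rfl, Or.inl rfl⟩
    · intro p hp
      exact Or.inl (by rw [hVIn0 p] at hp; simp [hp])
  constructor
  · exact bfsLoopA_true g rows cols (s1, s2) (rows * cols + 1) [(s1, s2)] vis0 hInv
  · intro hrtb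
    rcases hres : bfsLoopA g rows cols (rows * cols + 1) [(s1, s2)] vis0 with _ | _
    · exact absurd hrtb
        (bfsLoopA_false g rows cols (s1, s2) (rows * cols + 1) [(s1, s2)] vis0 (by simp; omega) hInv hres)
    · exact hres

-- ---- shared cell-list vocabulary ----
def castP (q : Nat × Nat) : Int × Int := ((q.1 : Int), (q.2 : Int))

lemma castP_inj : Function.Injective castP := by
  rintro ⟨a, b⟩ ⟨c, d⟩ h
  simp only [castP, Prod.mk.injEq] at h
  exact Prod.ext (by omega) (by omega)

def cellsNat (rows cols : Nat) : List (Nat × Nat) :=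
  (List.range rows).flatMap (fun r => (List.range cols).map (fun c => (r, c)))

lemma mem_cellsNat {rows cols : Nat} {q : Nat × Nat} :
    q ∈ cellsNat rows cols ↔ InR rows cols q := by
  obtain ⟨r, c⟩ := q
  simp only [cellsNat, List.mem_flatMap, List.mem_map, List.mem_range, InR, Prod.mk.injEq]
  constructor
  · rintro ⟨a, ha, b, hb, rfl, rfl⟩
    exact ⟨ha, hb⟩
  · rintro ⟨h1, h2⟩
    exact ⟨r, h1, c, h2, rfl, rfl⟩

lemma nodup_cellsNat (rows cols : Nat) : (cellsNat rows cols).Nodup := by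
  rw [cellsNat, List.nodup_flatMap]
  constructor
  · intro r _
    exact List.nodup_range.map (fun a b h => (Prod.mk.injEq _ _ _ _).mp h |>.2)
  · have hlt : (List.range rows).Pairwise (· < ·) := List.pairwise_lt_range
    apply hlt.imp
    intro a b hab x hxa hxb
    simp only [List.mem_map, List.mem_range] at hxa hxb
    obtain ⟨c1, _, h1⟩ := hxa
    obtain ⟨c2, _, h2⟩ := hxb
    rw [← h1] at h2
    have := (Prod.mk.injEq _ _ _ _).mp h2 |>.1
    omega

lemma length_cellsNat (rows cols : Nat) : (cellsNat rows cols).length = rows * cols := by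
  simp [cellsNat, List.length_flatMap]

lemma flatMap_map_left {α β γ : Type} (l : List α) (f : α → β) (g : β → List γ) :
    (l.map f).flatMap g = l.flatMap (fun x => g (f x)) := by
  induction l with
  | nil => rfl
  | cons x t ih => simp [List.flatMap_cons, ih]

lemma map_flatMap_right {α β γ : Type} (l : List α) (f : α → List β) (g : β → γ) :
    (l.flatMap f).map g = l.flatMap (fun x => (f x).map g) := by
  induction l with
  | nil => rfl
  | cons x t ih => simp [List.flatMap_cons, ih]

lemma cellsB_eq_map (rows cols : Nat) :
    cellsB rows cols = (cellsNat rows cols).map castP := by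
  unfold cellsB cellsNat
  rw [PySem.List.pyRange_zero_natCast rows, PySem.List.pyRange_zero_natCast cols]
  rw [flatMap_map_left, map_flatMap_right]
  congr 1
  funext r
  rw [List.map_map, List.map_map]
  rfl

lemma nodup_cellsB (rows cols : Nat) : (cellsB rows cols).Nodup := by
  rw [cellsB_eq_map]
  exact (nodup_cellsNat rows cols).map castP_inj

-- ---- A's two branches as collect-then-remove over cellsNat ----
lemma foldl_foldl_eq_foldl_flatMap {α β γ : Type} (l : List γ) (h : γ → List α)
    (f : β → α → β) (init : β) :
    l.foldl (fun acc x => (h x).foldl f acc) init = (l.flatMap h).foldl f init := by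
  induction l generalizing init with
  | nil => rfl
  | cons x t ih => simp [List.flatMap_cons, List.foldl_append, ih]

lemma gget_gset_ne (g : PvGrid) (r c r' c' : Nat) (h : (r', c') ≠ (r, c)) :
    gget (gset g r c) r' c' = gget g r' c' := by
  unfold gget gset
  by_cases hr : r' = r
  · subst hr
    have hc : c' ≠ c := fun hc => h (by rw [hc])
    by_cases hlen : r' < g.length
    · rw [pv_getD_set_eq _ _ _ _ hlen, pv_getD_set_ne _ _ _ _ _ hc]
    · rw [pv_set_oob _ _ _ (by omega)]
  · rw [pv_getD_set_ne _ _ _ _ _ hr]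

def GShape (g : PvGrid) (rows cols : Nat) : Prop :=
  g.length = rows ∧ ∀ row ∈ g, cols ≤ row.length

lemma gget_gset_self (g : PvGrid) (rows cols r c : Nat) (hs : GShape g rows cols)
    (hr : r < rows) (hc : c < cols) : gget (gset g r c) r c = none := by
  obtain ⟨hl, hrow⟩ := hs
  have hr' : r < g.length := by omega
  have hcr : c < (g.getD r []).length := lt_of_lt_of_le hc (hrow _ (pv_getD_mem _ _ _ hr'))
  unfold gget gset
  rw [pv_getD_set_eq _ _ _ _ hr', pv_getD_set_eq _ _ _ _ hcr]

lemma gshape_gset (g : PvGrid) (rows cols r c : Nat) (hs : GShape g rows cols) :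
    GShape (gset g r c) rows cols := by
  obtain ⟨hl, hrow⟩ := hs
  by_cases hr : r < g.length
  · refine ⟨by simpa [gset] using hl, ?_⟩
    intro row hm
    rcases List.mem_or_eq_of_mem_set hm with h | h
    · exact hrow _ h
    · subst h
      rw [List.length_set]
      exact hrow _ (pv_getD_mem _ _ _ hr)
  · unfold gset
    rw [pv_set_oob _ _ _ (by omega)]
    exact ⟨hl, hrow⟩

lemma craneFold (order : Char) :
    ∀ (cells : List (Nat × Nat)), cells.Nodup → ∀ (g : PvGrid) (a : Int),
      cells.foldl (fun st q => if gget st.1 q.1 q.2 = some order then (gset st.1 q.1 q.2, st.2 + 1) else st) (g, a) =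
        ((cells.filter (fun q => gget g q.1 q.2 == some order)).foldl (fun g q => gset g q.1 q.2) g,
          a + ((cells.filter (fun q => gget g q.1 q.2 == some order)).length : Int)) := by
  intro cells
  induction cells with
  | nil => intro _ g a; simp
  | cons q t ih =>
    intro hnd g a
    have hq : q ∉ t := (List.nodup_cons.mp hnd).1
    have hnd' := (List.nodup_cons.mp hnd).2
    simp only [List.foldl_cons, List.filter_cons]
    by_cases hcond : gget g q.1 q.2 = some order
    · rw [if_pos hcond, show (gget g q.1 q.2 == some order) = true by simp [hcond]]
      rw [ih hnd' (gset g q.1 q.2) (a + 1)]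
      have hfe : t.filter (fun p => gget (gset g q.1 q.2) p.1 p.2 == some order) =
          t.filter (fun p => gget g p.1 p.2 == some order) := by
        apply List.filter_congr
        intro p hp
        rw [gget_gset_ne _ _ _ _ _ (fun he => hq (by
          have hpq : p = q := Prod.ext (congrArg Prod.fst he) (congrArg Prod.snd he)
          exact hpq ▸ hp))]
      rw [hfe]
      refine Prod.ext rfl ?_
      simp only [if_true]
      push_cast [List.length_cons]
      ring
    · rw [if_neg hcond, show (gget g q.1 q.2 == some order) = false by simp [hcond]]
      exact ih hnd' g a

lemma craneScan_eq (rows cols : Nat) (order : Char) (g : PvGrid) (a : Int) :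
    craneScan rows cols order (g, a) =
      (((cellsNat rows cols).filter (fun q => gget g q.1 q.2 == some order)).foldl
          (fun g q => gset g q.1 q.2) g,
        a + (((cellsNat rows cols).filter (fun q => gget g q.1 q.2 == some order)).length : Int)) := by
  unfold craneScan
  calc (List.range rows).foldl (fun st2 r =>
        (List.range cols).foldl (fun st3 c =>
          if gget st3.1 r c = some order then (gset st3.1 r c, st3.2 + 1) else st3) st2) (g, a)
      = (List.range rows).foldl (fun st2 r =>
          (((List.range cols).map (fun c => (r, c)))).foldl (fun st3 q =>
            if gget st3.1 q.1 q.2 = some order then (gset st3.1 q.1 q.2, st3.2 + 1) else st3) st2) (g, a) := by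
        refine PySem.List.foldl_congr_mem _ _ _ _ ?_
        intro st2 r _
        rw [List.foldl_map]
    _ = (cellsNat rows cols).foldl (fun st q =>
          if gget st.1 q.1 q.2 = some order then (gset st.1 q.1 q.2, st.2 + 1) else st) (g, a) := by
        rw [cellsNat]
        exact foldl_foldl_eq_foldl_flatMap _ _ _ _
    _ = _ := craneFold order (cellsNat rows cols) (nodup_cellsNat rows cols) g a

lemma removal_eq (L : List (Nat × Nat)) :
    ∀ (g : PvGrid) (a : Int),
      L.foldl (fun st2 rc => (gset st2.1 rc.1 rc.2, st2.2 + 1)) (g, a) =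
        (L.foldl (fun g rc => gset g rc.1 rc.2) g, a + L.length) := by
  induction L with
  | nil => intro g a; simp
  | cons rc t ih =>
    intro g a
    simp only [List.foldl_cons, List.length_cons]
    rw [ih]
    congr 1
    push_cast
    ring

lemma scanA_eq_filter (g : PvGrid) (rows cols : Nat) (order : Char) :
    scanA g rows cols order = (cellsNat rows cols).filter
      (fun q => gget g q.1 q.2 == some order && bfsA g q.1 q.2 rows cols) := by
  unfold scanA
  rw [PySem.List.foldl_congr_mem _ _ (fun temp r =>
      temp ++ ((List.range cols).filter
        (fun c => gget g r c == some order && bfsA g r c rows cols)).map (fun c => (r, c))) _ ?_]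
  · rw [PySem.List.foldl_append_eq_flatMap, List.nil_append]
    unfold cellsNat
    rw [List.filter_flatMap]
    congr 1
    funext r
    rw [List.filter_map]
    rfl
  · intro temp r _
    rw [PySem.List.foldl_congr_mem _ _ (fun temp c =>
        if (gget g r c == some order && bfsA g r c rows cols) then temp ++ [(r, c)] else temp) _ ?_]
    · exact PySem.List.foldl_append_if _ _ _ _
    · intro acc c _
      by_cases h1 : gget g r c = some order <;> by_cases h2 : bfsA g r c rows cols = true <;>
        simp [h1, h2]

-- ---- the board relation between A's grid and B's dict ----
def RelGB (g : PvGrid) (box : PySem.Dict (Int × Int) Char) (rows cols : Nat) : Prop :=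
  ∀ r c : Nat, r < rows → c < cols → box.get? ((r : Int), (c : Int)) = gget g r c

lemma find?_filter_ne {κ ν : Type} [BEq κ] [LawfulBEq κ] [DecidableEq κ] (l : List (κ × ν)) (k k' : κ) :
    (List.filter (fun p => !(p.1 == k)) l).find? (fun p => p.1 == k') =
      if k' = k then none else l.find? (fun p => p.1 == k') := by
  induction l with
  | nil => simp
  | cons p t ih =>
    rw [List.filter_cons]
    by_cases h1 : p.1 = k
    · rw [show (!(p.1 == k)) = false from by simp [h1]]
      simp only [Bool.false_eq_true, if_false]
      rw [ih]
      by_cases h2 : k' = k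
      · simp [h2]
      · have hne : (p.1 == k') = false := by
          simp only [beq_eq_false_iff_ne, ne_eq]
          intro he
          exact h2 (by rw [← he, h1])
        simp [h2, hne]
    · rw [show (!(p.1 == k)) = true from by simp [h1]]
      simp only [if_true]
      by_cases h2 : p.1 = k'
      · have ht : (p.1 == k') = true := by simp [h2]
        have hk : k' ≠ k := fun he => h1 (by rw [h2, he])
        simp [ht, hk]
      · have hf : (p.1 == k') = false := by simp [h2]
        simp [hf, ih]

lemma dict_get?_erase {κ ν : Type} [BEq κ] [LawfulBEq κ] [DecidableEq κ] (d : PySem.Dict κ ν) (k k' : κ) :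
    (d.erase k).get? k' = if k' = k then none else d.get? k' := by
  show ((d.items.filter (fun p => !(p.1 == k))).find? (fun p => p.1 == k')).map (·.2) =
    if k' = k then none else (d.items.find? (fun p => p.1 == k')).map (·.2)
  rw [find?_filter_ne]
  by_cases h : k' = k
  · rw [if_pos h, if_pos h]
    rfl
  · rw [if_neg h, if_neg h]

lemma rel_fold_removal (rows cols : Nat) :
    ∀ (L : List (Nat × Nat)), (∀ q ∈ L, InR rows cols q) →
      ∀ (g : PvGrid) (box : PySem.Dict (Int × Int) Char),
        RelGB g box rows cols → GShape g rows cols →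
        RelGB (L.foldl (fun g q => gset g q.1 q.2) g)
            ((L.map castP).foldl (fun d p => d.erase p) box) rows cols ∧
          GShape (L.foldl (fun g q => gset g q.1 q.2) g) rows cols := by
  intro L
  induction L with
  | nil => intro _ g box h1 h2; exact ⟨h1, h2⟩
  | cons q t ih =>
    intro hin g box h1 h2
    simp only [List.map_cons, List.foldl_cons]
    have hq := hin q List.mem_cons_self
    apply ih (fun p hp => hin p (List.mem_cons_of_mem _ hp))
    · intro r c hr hc
      rw [dict_get?_erase]
      by_cases he : ((r : Int), (c : Int)) = castP q
      · rw [if_pos he]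
        have hrc : (r, c) = q := castP_inj (show castP (r, c) = castP q from he)
        rw [← hrc, gget_gset_self g rows cols r c h2 hr hc]
      · rw [if_neg he, h1 r c hr hc]
        have hne : (r, c) ≠ q := fun hh => he (by rw [show ((r : Int), (c : Int)) = castP (r, c) from rfl, hh])
        rw [gget_gset_ne]
        intro hh
        apply hne
        obtain ⟨q1, q2⟩ := q
        exact hh
    · exact gshape_gset _ _ _ _ _ h2

-- ---- B's fixpoint computes the border-reachable empty cells ----
def GoodB (g : PvGrid) (rows cols : Nat) (p : Int × Int) : Prop :=
  ∃ q : Nat × Nat, p = castP q ∧ InR rows cols q ∧ Emp g q ∧ RFB g rows cols q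

lemma mem_nbrsB_iff (q u : Nat × Nat) : castP u ∈ nbrsB (castP q) ↔ Adj q u := by
  simp only [nbrsB, castP, List.mem_cons, List.not_mem_nil, or_false, Prod.mk.injEq, Adj]
  omega

lemma onBorderB_castP (rows cols : Nat) (q : Nat × Nat) (h : InR rows cols q) :
    onBorderB rows cols (castP q) = true ↔ Border rows cols q := by
  obtain ⟨h1, h2⟩ := h
  simp only [onBorderB, castP, Bool.or_eq_true, beq_iff_eq, Border]
  omega

lemma contains_box_empty {g : PvGrid} {box : PySem.Dict (Int × Int) Char} {rows cols : Nat}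
    (hRel : RelGB g box rows cols) (q : Nat × Nat) (h : InR rows cols q) :
    box.contains (castP q) = false ↔ Emp g q := by
  obtain ⟨q1, q2⟩ := q
  rw [PySem.Dict.contains_eq_isSome_get?, show castP (q1, q2) = ((q1 : Int), (q2 : Int)) from rfl,
    hRel q1 q2 h.1 h.2]
  unfold Emp gget
  cases (g.getD q1 []).getD q2 none <;> simp

def InvReach (g : PvGrid) (rows cols : Nat) (reach : List (Int × Int)) : Prop :=
  ∀ p ∈ reach, GoodB g rows cols p

lemma mem_cellsB {rows cols : Nat} {p : Int × Int} :
    p ∈ cellsB rows cols ↔ ∃ q : Nat × Nat, p = castP q ∧ InR rows cols q := by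
  rw [cellsB_eq_map]
  simp only [List.mem_map]
  constructor
  · rintro ⟨q, hq, rfl⟩
    exact ⟨q, rfl, mem_cellsNat.mp hq⟩
  · rintro ⟨q, rfl, hq⟩
    exact ⟨q, mem_cellsNat.mpr hq, rfl⟩

lemma newCellsB_sound {g : PvGrid} {box : PySem.Dict (Int × Int) Char} {rows cols : Nat}
    (hRel : RelGB g box rows cols) (reach : List (Int × Int))
    (hreach : InvReach g rows cols reach) :
    ∀ p ∈ newCellsB box reach rows cols, GoodB g rows cols p ∧ p ∉ reach := by
  intro p hp
  rw [newCellsB, List.mem_filter] at hp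
  obtain ⟨hcell, hpred⟩ := hp
  obtain ⟨q, rfl, hq⟩ := mem_cellsB.mp hcell
  simp only [Bool.and_eq_true, Bool.not_eq_true', Bool.or_eq_true] at hpred
  obtain ⟨⟨hbox, hnr⟩, hacc⟩ := hpred
  have hemp : Emp g q := (contains_box_empty hRel q hq).mp hbox
  have hnotin : castP q ∉ reach := by
    intro hmem
    rw [(PySem.Set.contains_iff reach (castP q)).mpr hmem] at hnr
    exact Bool.true_eq_false.mp hnr
  refine ⟨⟨q, rfl, hq, hemp, ?_⟩, hnotin⟩
  rcases hacc with hb | hany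
  · exact ⟨q, (onBorderB_castP rows cols q hq).mp hb, ReachE.refl q hq hemp⟩
  · rw [List.any_eq_true] at hany
    obtain ⟨n, hn, hcn⟩ := hany
    have hnm : n ∈ reach := (PySem.Set.contains_iff reach n).mp hcn
    obtain ⟨u, rfl, hui, hue, b, hbb, hre⟩ := hreach n hnm
    have hadj : Adj q u := (mem_nbrsB_iff q u).mp hn
    exact ⟨b, hbb, ReachE_snoc hre (Adj_symm hadj) hq hemp⟩

lemma reach_closed_complete {g : PvGrid} {box : PySem.Dict (Int × Int) Char} {rows cols : Nat}
    (hRel : RelGB g box rows cols) (reach : List (Int × Int))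
    (hcl : newCellsB box reach rows cols = []) :
    ∀ p, GoodB g rows cols p → p ∈ reach := by
  have hC : ∀ q : Nat × Nat, InR rows cols q → Emp g q →
      castP q ∈ reach ∨
        ¬ ((onBorderB rows cols (castP q) ||
            (nbrsB (castP q)).any (fun n => PySem.Set.contains reach n)) = true) := by
    intro q hq he
    have hmem : castP q ∈ cellsB rows cols := mem_cellsB.mpr ⟨q, rfl, hq⟩
    have hfalse := (List.filter_eq_nil_iff.mp hcl) (castP q) hmem
    by_cases hr : castP q ∈ reach
    · left; exact hr
    · right
      intro hacc
      apply hfalse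
      have hb : box.contains (castP q) = false := (contains_box_empty hRel q hq).mpr he
      have hcr : PySem.Set.contains reach (castP q) = false := by
        cases h : PySem.Set.contains reach (castP q) with
        | false => rfl
        | true => exact absurd ((PySem.Set.contains_iff _ _).mp h) hr
      rw [hb, hcr, hacc]
      rfl
  intro p hp
  obtain ⟨q, rfl, hqi, hqe, b, hbb, hre⟩ := hp
  have hb : castP b ∈ reach := by
    rcases hC b (ReachE_head hre).1 (ReachE_head hre).2 with h | h
    · exact h
    · exact absurd (by
        rw [Bool.or_eq_true]
        exact Or.inl ((onBorderB_castP rows cols b (ReachE_head hre).1).mpr hbb)) h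
  exact ReachE_closed (fun x => castP x ∈ reach)
    (fun x hx u hadj hui hue => by
      rcases hC u hui hue with h | h
      · exact h
      · exact absurd (by
          rw [Bool.or_eq_true]
          refine Or.inr (List.any_eq_true.mpr ?_)
          exact ⟨castP x, (mem_nbrsB_iff u x).mpr (Adj_symm hadj),
            (PySem.Set.contains_iff _ _).mpr hx⟩) h)
    hre hb

lemma reachGrow_succ (box : PySem.Dict (Int × Int) Char) (rows cols fuel : Nat)
    (reach : PySem.Set (Int × Int)) :
    reachGrow box rows cols (fuel + 1) reach =
      if newCellsB box reach rows cols = [] then reach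
      else reachGrow box rows cols fuel (PySem.Set.update reach (newCellsB box reach rows cols)) := rfl

lemma reachGrow_spec {g : PvGrid} {box : PySem.Dict (Int × Int) Char} {rows cols : Nat}
    (hRel : RelGB g box rows cols) :
    ∀ (fuel : Nat) (reach : List (Int × Int)),
      InvReach g rows cols reach → reach.Nodup → (∀ p ∈ reach, p ∈ cellsB rows cols) →
      rows * cols + 1 ≤ fuel + reach.length →
      InvReach g rows cols (reachGrow box rows cols fuel reach) ∧
        newCellsB box (reachGrow box rows cols fuel reach) rows cols = [] := by
  intro fuel
  induction fuel with
  | zero =>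
    intro reach hInv hnd hsub hm
    exfalso
    have hsubset : reach ⊆ cellsB rows cols := fun p hp => hsub p hp
    have hle : reach.length ≤ (cellsB rows cols).length := (hnd.subperm hsubset).length_le
    have hlen : (cellsB rows cols).length = rows * cols := by
      rw [cellsB_eq_map, List.length_map, length_cellsNat]
    omega
  | succ fuel ih =>
    intro reach hInv hnd hsub hm
    rw [reachGrow_succ]
    by_cases hnew : newCellsB box reach rows cols = []
    · rw [if_pos hnew]
      exact ⟨hInv, hnew⟩
    · rw [if_neg hnew]
      have hsound := newCellsB_sound hRel reach hInv
      have hndnew : (newCellsB box reach rows cols).Nodup :=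
        List.Nodup.filter _ (nodup_cellsB rows cols)
      have hdisj : ∀ x ∈ newCellsB box reach rows cols, x ∉ reach :=
        fun x hx => (hsound x hx).2
      rw [PySem.Set.update_eq_append_of_disjoint _ _ hndnew hdisj]
      have hpos : 1 ≤ (newCellsB box reach rows cols).length :=
        List.length_pos_iff.mpr hnew
      refine ih (reach ++ newCellsB box reach rows cols) ?_ ?_ ?_ ?_
      · intro p hp
        rcases List.mem_append.mp hp with h | h
        · exact hInv p h
        · exact (hsound p h).1
      · exact List.Nodup.append hnd hndnew (fun a ha hb => hdisj a hb ha)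
      · intro p hp
        rcases List.mem_append.mp hp with h | h
        · exact hsub p h
        · exact (List.mem_filter.mp (by rw [newCellsB] at h; exact h)).1
      · rw [List.length_append]
        omega

lemma reachGrow_mem {g : PvGrid} {box : PySem.Dict (Int × Int) Char} {rows cols : Nat}
    (hRel : RelGB g box rows cols) :
    ∀ p, p ∈ reachGrow box rows cols (rows * cols + 1) PySem.Set.empty ↔ GoodB g rows cols p := by
  have hempty : (PySem.Set.empty : PySem.Set (Int × Int)) = ([] : List (Int × Int)) := rfl
  obtain ⟨hInv, hcl⟩ := reachGrow_spec hRel (rows * cols + 1) PySem.Set.empty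
    (by rw [hempty]; intro p hp; simp at hp)
    (by rw [hempty]; exact List.nodup_nil)
    (by rw [hempty]; intro p hp; simp at hp)
    (by rw [hempty]; simp)
  intro p
  exact ⟨fun h => hInv p h, fun h => reach_closed_complete hRel _ hcl p h⟩

-- ---- the per-cell decisions agree ----
lemma accB_eq_bfsA {g : PvGrid} {box : PySem.Dict (Int × Int) Char} {rows cols : Nat}
    (hRel : RelGB g box rows cols) (q : Nat × Nat) (hq : InR rows cols q) :
    (onBorderB rows cols (castP q) ||
      (nbrsB (castP q)).any (fun n => PySem.Set.contains
        (reachGrow box rows cols (rows * cols + 1) PySem.Set.empty) n)) =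
      bfsA g q.1 q.2 rows cols := by
  have hmem := reachGrow_mem hRel (rows := rows) (cols := cols)
  have hbfs : bfsA g q.1 q.2 rows cols = true ↔ RTB g rows cols q := by
    have := bfsA_correct g rows cols q hq
    simpa using this
  have hlhs : (onBorderB rows cols (castP q) ||
      (nbrsB (castP q)).any (fun n => PySem.Set.contains
        (reachGrow box rows cols (rows * cols + 1) PySem.Set.empty) n)) = true ↔
      RTB g rows cols q := by
    rw [Bool.or_eq_true, List.any_eq_true]
    constructor
    · rintro (hb | ⟨n, hn, hcn⟩)
      · exact Or.inl ((onBorderB_castP rows cols q hq).mp hb)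
      · obtain ⟨u, rfl, hui, hue, b, hbb, hre⟩ :=
          (hmem n).mp ((PySem.Set.contains_iff _ _).mp hcn)
        exact Or.inr ⟨u, (mem_nbrsB_iff q u).mp hn, hui, hue, b, ReachE_symm hre, hbb⟩
    · rintro (hb | ⟨u, hadj, hui, hue, b, hre, hbb⟩)
      · exact Or.inl ((onBorderB_castP rows cols q hq).mpr hb)
      · refine Or.inr ⟨castP u, (mem_nbrsB_iff q u).mpr hadj, ?_⟩
        exact (PySem.Set.contains_iff _ _).mpr
          ((hmem (castP u)).mpr ⟨u, rfl, hui, hue, b, hbb, ReachE_symm hre⟩)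
  cases hA : (onBorderB rows cols (castP q) ||
      (nbrsB (castP q)).any (fun n => PySem.Set.contains
        (reachGrow box rows cols (rows * cols + 1) PySem.Set.empty) n)) with
  | false =>
    cases hB : bfsA g q.1 q.2 rows cols with
    | false => rfl
    | true =>
      have hcontra := hlhs.mpr (hbfs.mp hB)
      rw [hA] at hcontra
      exact Bool.noConfusion hcontra
  | true =>
    cases hB : bfsA g q.1 q.2 rows cols with
    | false =>
      have hcontra := hbfs.mpr (hlhs.mp hA)
      rw [hB] at hcontra
      exact Bool.noConfusion hcontra
    | true => rfl

lemma takeForkB_eq {g : PvGrid} {box : PySem.Dict (Int × Int) Char} {rows cols : Nat}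
    (order : Char) (hRel : RelGB g box rows cols) :
    takeForkB box rows cols order = ((cellsNat rows cols).filter
      (fun q => gget g q.1 q.2 == some order && bfsA g q.1 q.2 rows cols)).map castP := by
  unfold takeForkB
  rw [cellsB_eq_map, List.filter_map]
  congr 1
  apply List.filter_congr
  intro q hq
  have hInR := mem_cellsNat.mp hq
  show (box.get? (castP q) == some order && _) = _
  rw [show box.get? (castP q) = gget g q.1 q.2 from hRel q.1 q.2 hInR.1 hInR.2]
  rw [accB_eq_bfsA hRel q hInR]

lemma takeCraneB_eq {g : PvGrid} {box : PySem.Dict (Int × Int) Char} {rows cols : Nat}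
    (order : Char) (hRel : RelGB g box rows cols) :
    takeCraneB box rows cols order = ((cellsNat rows cols).filter
      (fun q => gget g q.1 q.2 == some order)).map castP := by
  unfold takeCraneB
  rw [cellsB_eq_map, List.filter_map]
  congr 1
  apply List.filter_congr
  intro q hq
  have hInR := mem_cellsNat.mp hq
  show (box.get? (castP q) == some order) = _
  rw [show box.get? (castP q) = gget g q.1 q.2 from hRel q.1 q.2 hInR.1 hInR.2]

-- ---- one request preserves the relation and the counters agree ----
lemma stepReq_rel (rows cols : Nat) (req : String) (g : PvGrid)
    (box : PySem.Dict (Int × Int) Char) (a : Int)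
    (h1 : RelGB g box rows cols) (h2 : GShape g rows cols) :
    RelGB (stepReqA rows cols (g, a) req).1 (stepReqB rows cols (box, a) req).1 rows cols ∧
      GShape (stepReqA rows cols (g, a) req).1 rows cols ∧
      (stepReqA rows cols (g, a) req).2 = (stepReqB rows cols (box, a) req).2 := by
  cases hreq : req.toList with
  | nil =>
    have hA : stepReqA rows cols (g, a) req = (g, a) := by simp [stepReqA, hreq]
    have hB : stepReqB rows cols (box, a) req = (box, a) := by simp [stepReqB, hreq]
    rw [hA, hB]
    exact ⟨h1, h2, rfl⟩
  | cons order rest =>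
    by_cases hrest : rest = []
    · subst hrest
      have hA : stepReqA rows cols (g, a) req =
          (((cellsNat rows cols).filter
              (fun q => gget g q.1 q.2 == some order && bfsA g q.1 q.2 rows cols)).foldl
            (fun g q => gset g q.1 q.2) g,
           a + (((cellsNat rows cols).filter
              (fun q => gget g q.1 q.2 == some order && bfsA g q.1 q.2 rows cols)).length : Int)) := by
        simp only [stepReqA, hreq, if_pos]
        rw [scanA_eq_filter, removal_eq]
      have hB : stepReqB rows cols (box, a) req =
          ((((cellsNat rows cols).filter
              (fun q => gget g q.1 q.2 == some order && bfsA g q.1 q.2 rows cols)).map castP).foldl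
            (fun d p => d.erase p) box,
           a + ((((cellsNat rows cols).filter
              (fun q => gget g q.1 q.2 == some order && bfsA g q.1 q.2 rows cols)).map castP).length : Int)) := by
        simp only [stepReqB, hreq, if_pos]
        rw [takeForkB_eq order h1]
      obtain ⟨hR, hS⟩ := rel_fold_removal rows cols
        ((cellsNat rows cols).filter
          (fun q => gget g q.1 q.2 == some order && bfsA g q.1 q.2 rows cols))
        (fun q hq => mem_cellsNat.mp (List.mem_filter.mp hq).1) g box h1 h2
      rw [hA, hB]
      exact ⟨hR, hS, by rw [List.length_map]⟩
    · have hA : stepReqA rows cols (g, a) req =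
          (((cellsNat rows cols).filter (fun q => gget g q.1 q.2 == some order)).foldl
            (fun g q => gset g q.1 q.2) g,
           a + (((cellsNat rows cols).filter (fun q => gget g q.1 q.2 == some order)).length : Int)) := by
        simp only [stepReqA, hreq, if_neg hrest]
        exact craneScan_eq rows cols order g a
      have hB : stepReqB rows cols (box, a) req =
          ((((cellsNat rows cols).filter (fun q => gget g q.1 q.2 == some order)).map castP).foldl
            (fun d p => d.erase p) box,
           a + ((((cellsNat rows cols).filter (fun q => gget g q.1 q.2 == some order)).map castP).length : Int)) := by
        simp only [stepReqB, hreq, if_neg hrest]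
        rw [takeCraneB_eq order h1]
      obtain ⟨hR, hS⟩ := rel_fold_removal rows cols
        ((cellsNat rows cols).filter (fun q => gget g q.1 q.2 == some order))
        (fun q hq => mem_cellsNat.mp (List.mem_filter.mp hq).1) g box h1 h2
      rw [hA, hB]
      exact ⟨hR, hS, by rw [List.length_map]⟩

lemma fold_requests (rows cols : Nat) :
    ∀ (reqs : List String) (g : PvGrid) (box : PySem.Dict (Int × Int) Char) (a : Int),
      RelGB g box rows cols → GShape g rows cols →
      (reqs.foldl (stepReqA rows cols) (g, a)).2 = (reqs.foldl (stepReqB rows cols) (box, a)).2 := by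
  intro reqs
  induction reqs with
  | nil => intro g box a _ _; rfl
  | cons req t ih =>
    intro g box a h1 h2
    obtain ⟨hR, hS, hCnt⟩ := stepReq_rel rows cols req g box a h1 h2
    simp only [List.foldl_cons]
    rw [show stepReqA rows cols (g, a) req =
        ((stepReqA rows cols (g, a) req).1, (stepReqA rows cols (g, a) req).2) from rfl,
      show stepReqB rows cols (box, a) req =
        ((stepReqB rows cols (box, a) req).1, (stepReqB rows cols (box, a) req).2) from rfl,
      ← hCnt]
    exact ih _ _ _ hR hS

-- ---- the initial boards are related ----
lemma mem_enumerate_iff {α : Type} (xs : List α) (s : Int) (p : Int × α) :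
    p ∈ PySem.List.enumerate xs s ↔ ∃ i : Nat, p.1 = s + i ∧ xs[i]? = some p.2 := by
  induction xs generalizing s with
  | nil => simp [PySem.List.enumerate_nil]
  | cons x t ih =>
    rw [PySem.List.enumerate_cons, List.mem_cons, ih]
    constructor
    · rintro (rfl | ⟨i, hi, hv⟩)
      · exact ⟨0, by simp, by simp⟩
      · exact ⟨i + 1, by push_cast at hi ⊢; omega, by simpa using hv⟩
    · rintro ⟨i, hi, hv⟩
      cases i with
      | zero =>
        left
        simp only [List.getElem?_cons_zero, Option.some.injEq] at hv
        simp only [Nat.cast_zero, add_zero] at hi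
        exact Prod.ext hi hv.symm
      | succ i =>
        right
        exact ⟨i, by push_cast at hi ⊢; omega, by simpa using hv⟩

def pvPairs (storage : List String) (cols : Nat) : List ((Int × Int) × Char) :=
  (PySem.List.enumerate storage).flatMap (fun rp =>
    (PySem.List.enumerate (PySem.List.slice rp.2.toList none (some (cols : Int)))).map
      (fun cp => ((rp.1, cp.1), cp.2)))

lemma boxInit_eq_foldl (storage : List String) (cols : Nat) :
    boxInit storage cols =
      (pvPairs storage cols).foldl (fun d p => d.insert p.1 p.2) PySem.Dict.empty := by
  unfold boxInit pvPairs
  rw [← foldl_foldl_eq_foldl_flatMap]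
  refine PySem.List.foldl_congr_mem _ _ _ _ ?_
  intro d rp _
  rw [List.foldl_map]

lemma get?_foldl_insert_not_mem {κ ν : Type} [BEq κ] [LawfulBEq κ]
    (l : List (κ × ν)) (k : κ) (h : ∀ p ∈ l, p.1 ≠ k) :
    ∀ d : PySem.Dict κ ν, (l.foldl (fun d p => d.insert p.1 p.2) d).get? k = d.get? k := by
  induction l with
  | nil => intro d; rfl
  | cons p t ih =>
    intro d
    rw [List.foldl_cons, ih (fun q hq => h q (List.mem_cons_of_mem _ hq)),
      PySem.Dict.get?_insert_of_ne _ _ (fun he => h p List.mem_cons_self he.symm)]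

lemma get?_foldl_insert_unique {κ ν : Type} [BEq κ] [LawfulBEq κ]
    (l : List (κ × ν)) (k : κ) (v : ν) :
    (∃ p ∈ l, p.1 = k) → (∀ p ∈ l, p.1 = k → p.2 = v) →
    ∀ d : PySem.Dict κ ν, (l.foldl (fun d p => d.insert p.1 p.2) d).get? k = some v := by
  induction l with
  | nil =>
    rintro ⟨p, hp, _⟩
    simp at hp
  | cons p t ih =>
    intro hex hval d
    rw [List.foldl_cons]
    by_cases ht : ∃ q ∈ t, q.1 = k
    · exact ih ht (fun q hq => hval q (List.mem_cons_of_mem _ hq)) _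
    · have hpk : p.1 = k := by
        obtain ⟨q, hq, hqk⟩ := hex
        rcases List.mem_cons.mp hq with rfl | hq
        · exact hqk
        · exact absurd ⟨q, hq, hqk⟩ ht
      rw [get?_foldl_insert_not_mem t k (fun q hq hqk => ht ⟨q, hq, hqk⟩)]
      rw [← hpk, PySem.Dict.get?_insert_self, hval p List.mem_cons_self hpk]

lemma mem_pvPairs {storage : List String} {cols : Nat} {x : (Int × Int) × Char} :
    x ∈ pvPairs storage cols ↔ ∃ r c : Nat, r < storage.length ∧ c < cols ∧
      x.1 = ((r : Int), (c : Int)) ∧ (storage.getD r "").toList[c]? = some x.2 := by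
  unfold pvPairs
  simp only [List.mem_flatMap, List.mem_map]
  constructor
  · rintro ⟨rp, hrp, cp, hcp, rfl⟩
    obtain ⟨r, hr1, hr2⟩ := (mem_enumerate_iff _ _ _).mp hrp
    obtain ⟨c, hc1, hc2⟩ := (mem_enumerate_iff _ _ _).mp hcp
    have hrlt : r < storage.length := by
      by_contra hge
      rw [List.getElem?_eq_none (by omega)] at hr2
      simp at hr2
    rw [PySem.List.slice_to _ (Int.natCast_nonneg cols), Int.toNat_natCast,
      List.getElem?_take] at hc2
    have hclt : c < cols := by
      by_contra hge
      rw [if_neg hge] at hc2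
      simp at hc2
    rw [if_pos hclt] at hc2
    refine ⟨r, c, hrlt, hclt, ?_, ?_⟩
    · simp only [hr1, hc1]
      norm_num
    · have hrow : storage.getD r "" = rp.2 := by
        rw [List.getD_eq_getElem?_getD, hr2]
        rfl
      rw [hrow]
      exact hc2
  · rintro ⟨r, c, hr, hc, hx1, hx2⟩
    have hrow : storage[r]? = some (storage.getD r "") := by
      rw [List.getD_eq_getElem?_getD, List.getElem?_eq_getElem hr]
      rfl
    refine ⟨((r : Int), storage.getD r ""), ?_, ((c : Int), x.2), ?_, ?_⟩
    · rw [mem_enumerate_iff]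
      exact ⟨r, by simp, hrow⟩
    · rw [mem_enumerate_iff]
      refine ⟨c, by simp, ?_⟩
      rw [PySem.List.slice_to _ (Int.natCast_nonneg cols), Int.toNat_natCast,
        List.getElem?_take, if_pos hc]
      exact hx2
    · obtain ⟨x1, x2⟩ := x
      simp only at hx1
      rw [hx1]

lemma boxInit_get? (storage : List String) (cols : Nat) (r c : Nat)
    (hr : r < storage.length) (hc : c < cols)
    (hlen : cols ≤ (storage.getD r "").toList.length) :
    (boxInit storage cols).get? ((r : Int), (c : Int)) = (storage.getD r "").toList[c]? := by
  rw [boxInit_eq_foldl]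
  have hcl : c < (storage.getD r "").toList.length := lt_of_lt_of_le hc hlen
  rw [List.getElem?_eq_getElem hcl]
  apply get?_foldl_insert_unique
  · exact ⟨(((r : Int), (c : Int)), (storage.getD r "").toList[c]),
      mem_pvPairs.mpr ⟨r, c, hr, hc, rfl, List.getElem?_eq_getElem hcl⟩, rfl⟩
  · rintro p hp hkey
    obtain ⟨r', c', _, _, hk, hv⟩ := mem_pvPairs.mp hp
    rw [hk] at hkey
    have hrc : r' = r ∧ c' = c := by
      have h1 := congrArg Prod.fst hkey
      have h2 := congrArg Prod.snd hkey
      simp only at h1 h2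
      omega
    rw [hrc.1, hrc.2, List.getElem?_eq_getElem hcl] at hv
    exact (Option.some.injEq _ _).mp hv.symm

lemma relGB_init (storage : List String) (cols : Nat)
    (hlen : ∀ row ∈ storage, cols ≤ row.toList.length) :
    RelGB (storage.map (fun s => s.toList.map some)) (boxInit storage cols)
      storage.length cols := by
  intro r c hr hc
  have hrow : cols ≤ (storage.getD r "").toList.length := hlen _ (pv_getD_mem _ _ _ hr)
  rw [boxInit_get? storage cols r c hr hc hrow]
  unfold gget
  have h1 : (storage.map (fun s => s.toList.map some)).getD r [] =
      (storage.getD r "").toList.map some := by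
    rw [List.getD_eq_getElem?_getD, List.getElem?_map, List.getD_eq_getElem?_getD,
      List.getElem?_eq_getElem hr]
    rfl
  rw [h1]
  have hcl : c < (storage.getD r "").toList.length := lt_of_lt_of_le hc hrow
  simp only [List.getD_eq_getElem?_getD, List.getElem?_map]
  cases hx : (storage[r]?.getD "").toList[c]? <;> simp

lemma gshape_init (storage : List String) (cols : Nat)
    (hlen : ∀ row ∈ storage, cols ≤ row.toList.length) :
    GShape (storage.map (fun s => s.toList.map some)) storage.length cols := by
  refine ⟨List.length_map _, ?_⟩
  intro row hm
  obtain ⟨s, hs, rfl⟩ := List.mem_map.mp hm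
  rw [List.length_map]
  exact hlen s hs

-- ===== VERDICT (by name: the statement is the Claim_ definition above) =====
theorem solution_spec : Claim_equal_solution := by
  intro storage requests _ hpre
  obtain ⟨hne, _, hrag⟩ := hpre
  unfold Spec_solution
  show solution storage requests = solution_alt storage requests
  have h0 : 0 < storage.length := List.length_pos_iff.mpr hne
  have hrows : (storage.map (fun s => s.toList.map some)).length = storage.length :=
    List.length_map _
  have hcols : ((storage.map (fun s => s.toList.map some)).getD 0 []).length =
      (storage.getD 0 "").toList.length := by
    rw [List.getD_eq_getElem?_getD, List.getElem?_map, List.getD_eq_getElem?_getD,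
      List.getElem?_eq_getElem h0]
    simp
  simp only [solution, solution_alt, hrows, hcols]
  rcases hrag with rfl | hrag
  · rfl
  · rw [fold_requests storage.length (storage.getD 0 "").toList.length requests
      (storage.map (fun s => s.toList.map some)) (boxInit storage (storage.getD 0 "").toList.length) 0
      (relGB_init storage _ hrag) (gshape_init storage _ hrag)]
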